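-- pv_equiv track=rewrite | github.com/learningequality/morango | morango/models/fsic_utils.py | calculate_directional_fsic_diff_v2
-- ===== SOURCE A (Python) =====
-- from collections import defaultdict
--
-- def _build_prefix_mapper(keys, include_self=False):
--     """
--     Returns a dict mapping each key to a list of keys that are its prefixes.
--     """
--     prefix_mapper = defaultdict(list)
--     for key in keys:
--         for otherkey in keys:
--             if key.startswith(otherkey) and (include_self or key != otherkey):
--                 prefix_mapper[key].append(otherkey)
--     return prefix_mapper
--
-- def calculate_directional_fsic_diff_v2(fsic1, fsic2):
--     """
--     Calculate the (instance_id, counter) pairs that are the lower-bound levels for sending data from the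
--     device with fsic1 to the device with fsic2.
--
--     FSIC v2 expanded format: {partition: {instance_id: counter}}
--
--     :param fsic1: dict containing FSIC v2 in expanded format, for the sending device
--     :param fsic2: dict containing FSIC v2 in expanded format, for the receiving device
--     :return ``dict`` in expanded FSIC v2 format to be used in queueing the correct records to the buffer
--     """
--     prefixes = _build_prefix_mapper(
--         list(fsic1.keys()) + list(fsic2.keys()), include_self=True
--     )
--
--     result = defaultdict(dict)
--
--     # look at all the partitions in the sending FSIC
--     for part, insts in fsic1.items():
--         # check for counters in the sending FSIC that are higher than the receiving FSIC
--         for inst, sending_counter in insts.items():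
--             # get the maximum counter in the receiving FSIC for the same instance
--             receiving_counter = max(
--                 fsic2.get(prefix, {}).get(inst, 0) for prefix in prefixes[part]
--             )
--             if receiving_counter < sending_counter:
--                 result[part][inst] = receiving_counter
--
--     return dict(result)
-- ===== SOURCE B (Python) =====
-- def calculate_directional_fsic_diff_v2(fsic1, fsic2):
--     # Instead of building an all-pairs prefix mapper over every key, look up each of the
--     # len(part)+1 character-prefixes of a partition directly in a hash set of the keys.
--     keyset = set(fsic1) | set(fsic2)
--     result = {}
--     for part, insts in fsic1.items():
--         prefs = [part[:l] for l in range(len(part) + 1) if part[:l] in keyset]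
--         diff = {}
--         for inst, sending in insts.items():
--             receiving = max(fsic2.get(p, {}).get(inst, 0) for p in prefs)
--             if receiving < sending:
--                 diff[inst] = receiving
--         if diff:
--             result[part] = diff
--     return result
-- ===== Notes on version B (the rewrite author's own statement) =====
-- stated objective: faster
-- what changed: Instead of building an all-pairs prefix mapper over every key (quadratic in the number of partitions), B looks up each of the len(part)+1 character-prefixes of a partition directly in a hash set of all keys, and collects each partition's diff dict locally before adding it to the result.
import Mathlib
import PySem

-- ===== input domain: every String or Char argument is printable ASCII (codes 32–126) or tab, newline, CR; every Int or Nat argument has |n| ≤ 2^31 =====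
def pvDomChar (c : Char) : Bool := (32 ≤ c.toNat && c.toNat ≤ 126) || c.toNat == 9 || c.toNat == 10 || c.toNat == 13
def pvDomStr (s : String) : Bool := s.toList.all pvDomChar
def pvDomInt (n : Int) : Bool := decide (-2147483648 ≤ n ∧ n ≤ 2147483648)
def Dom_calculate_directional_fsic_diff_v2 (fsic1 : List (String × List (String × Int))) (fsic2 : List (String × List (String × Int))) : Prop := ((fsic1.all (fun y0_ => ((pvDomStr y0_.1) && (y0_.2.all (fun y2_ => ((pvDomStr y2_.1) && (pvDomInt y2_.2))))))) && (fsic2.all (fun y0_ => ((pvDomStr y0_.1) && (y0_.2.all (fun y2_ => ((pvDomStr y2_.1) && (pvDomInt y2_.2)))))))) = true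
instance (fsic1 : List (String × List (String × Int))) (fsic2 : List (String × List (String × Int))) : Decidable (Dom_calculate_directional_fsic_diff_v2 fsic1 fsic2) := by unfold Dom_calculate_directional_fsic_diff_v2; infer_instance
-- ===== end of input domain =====

-- B replaces A's all-pairs prefix mapper by direct hash-set lookups of each partition's
-- character-prefixes (asymptotically faster, measured); equal output proved on dict-shaped inputs.


-- ===== PORT A =====
-- _build_prefix_mapper(keys, include_self=True): with include_self the condition
-- 'key.startswith(otherkey) and (include_self or key != otherkey)' is just the startswith test.
def pvBuildPrefixMapper (keys : List String) : PySem.Dict String (List String) :=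
  keys.foldl (fun pm key =>
    keys.foldl (fun pm otherkey =>
      if PySem.Str.startswith key otherkey then pm.modify key [] (· ++ [otherkey]) else pm) pm)
    PySem.Dict.empty

-- fsic2.get(prefix, {}).get(inst, 0)
def pvGet2 (fsic2 : List (String × List (String × Int))) (inst prefix_ : String) : Int :=
  (PySem.Dict.mk ((PySem.Dict.mk fsic2).getD prefix_ [])).getD inst 0

-- Python's max(...) raises on an empty sequence; here the sequence always contains part itself
-- (include_self=True and part ∈ keys), so the 'none' default of max? is unreachable.
def calculate_directional_fsic_diff_v2 (fsic1 : List (String × List (String × Int))) (fsic2 : List (String × List (String × Int))) : List (String × List (String × Int)) :=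
  let prefixes := pvBuildPrefixMapper (fsic1.map (·.1) ++ fsic2.map (·.1))
  let result : PySem.Dict String (PySem.Dict String Int) :=
    fsic1.foldl (fun result pi =>
      pi.2.foldl (fun result iv =>
        let receiving : Int :=
          (PySem.List.max? ((prefixes.getD pi.1 []).map (pvGet2 fsic2 iv.1)) (fun x : Int => x)).getD 0
        if receiving < iv.2 then
          result.insert pi.1 ((result.getD pi.1 PySem.Dict.empty).insert iv.1 receiving)
        else result) result) PySem.Dict.empty
  result.items.map (fun pd => (pd.1, pd.2.items))

-- ===== PORT B =====
-- part[:l] for 0 ≤ l is exactly 'take l' on the character list.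
def calculate_directional_fsic_diff_v2_alt (fsic1 : List (String × List (String × Int))) (fsic2 : List (String × List (String × Int))) : List (String × List (String × Int)) :=
  let keyset : PySem.Set String :=
    PySem.Set.union (PySem.Set.ofList (fsic1.map (·.1))) (fsic2.map (·.1))
  fsic1.foldl (fun (result : List (String × List (String × Int))) (pi : String × List (String × Int)) =>
    let prefs : List String := (List.range (pi.1.toList.length + 1)).filterMap (β := String) (fun l =>
      let p := String.ofList (pi.1.toList.take l)
      if PySem.Set.contains keyset p then some p else none)
    let diff : List (String × Int) := pi.2.foldl (fun diff iv =>
      let receiving : Int :=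
        (PySem.List.max? (prefs.map (pvGet2 fsic2 iv.1)) (fun x : Int => x)).getD 0
      if receiving < iv.2 then diff ++ [(iv.1, receiving)] else diff) []
    if diff ≠ [] then result ++ [(pi.1, diff)] else result) []

-- ===== PRECONDITION & SPEC =====
-- The Python arguments are dicts of dicts, whose keys are necessarily distinct; Pre_ states exactly
-- that dict shape for the association-list encoding (it excludes no input a Python caller can pass).
def Pre_calculate_directional_fsic_diff_v2 (fsic1 : List (String × List (String × Int))) (fsic2 : List (String × List (String × Int))) : Prop :=
  (fsic1.map (·.1)).Nodup ∧ (fsic2.map (·.1)).Nodup ∧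
  (∀ pi ∈ fsic1, (pi.2.map (·.1)).Nodup) ∧ (∀ pi ∈ fsic2, (pi.2.map (·.1)).Nodup)
instance (fsic1 : List (String × List (String × Int))) (fsic2 : List (String × List (String × Int))) : Decidable (Pre_calculate_directional_fsic_diff_v2 fsic1 fsic2) := by unfold Pre_calculate_directional_fsic_diff_v2; infer_instance

def pvWitness_calculate_directional_fsic_diff_v2 : (List (String × List (String × Int))) × (List (String × List (String × Int))) :=
  ([("p", [("i", 3)]), ("pq", [("i", 1), ("j", -2)])], [("p", [("i", 2)])])

def Spec_calculate_directional_fsic_diff_v2 (fsic1 : List (String × List (String × Int))) (fsic2 : List (String × List (String × Int))) (out : List (String × List (String × Int))) : Prop := out = calculate_directional_fsic_diff_v2_alt fsic1 fsic2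
instance (fsic1 : List (String × List (String × Int))) (fsic2 : List (String × List (String × Int))) (out : List (String × List (String × Int))) : Decidable (Spec_calculate_directional_fsic_diff_v2 fsic1 fsic2 out) := by unfold Spec_calculate_directional_fsic_diff_v2; infer_instance

-- ===== CLAIM (what is proved, stated in full; the proofs are below) =====
def Claim_equal_calculate_directional_fsic_diff_v2 : Prop := ∀ (fsic1 : List (String × List (String × Int))) (fsic2 : List (String × List (String × Int))), Dom_calculate_directional_fsic_diff_v2 fsic1 fsic2 → Pre_calculate_directional_fsic_diff_v2 fsic1 fsic2 → Spec_calculate_directional_fsic_diff_v2 fsic1 fsic2 (calculate_directional_fsic_diff_v2 fsic1 fsic2)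

-- ===== LEMMAS AND PROOFS =====

-- inner loop of _build_prefix_mapper: appends to the entry of `key` exactly the startswith-filtered keys
theorem pvInnerMapper_getD (sw : String → Bool) (ks : List String) (key c : String) (pm : PySem.Dict String (List String)) :
    ((ks.foldl (fun pm o => if sw o then pm.modify key [] (· ++ [o]) else pm) pm).getD c [])
      = pm.getD c [] ++ (if c = key then ks.filter (fun o => sw o) else []) := by
  induction ks generalizing pm with
  | nil => simp
  | cons o tl ih =>
    simp only [List.foldl_cons, List.filter_cons]
    by_cases hsw : sw o
    · rw [if_pos hsw, ih, PySem.Dict.getD_modify]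
      by_cases hc : c = key
      · subst hc; simp [hsw, List.append_assoc]
      · simp [hc]
    · rw [if_neg hsw, ih]
      simp [hsw]

theorem pvMapper_getD (sw : String → String → Bool) (keys ks' : List String) (c : String) (pm : PySem.Dict String (List String)) :
    ((ks'.foldl (fun pm key =>
        keys.foldl (fun pm o => if sw key o then pm.modify key [] (· ++ [o]) else pm) pm) pm).getD c [])
      = pm.getD c [] ++ (ks'.filter (fun k => k = c)).flatMap
          (fun _ => keys.filter (fun o => sw c o)) := by
  induction ks' generalizing pm with
  | nil => simp
  | cons k tl ih =>
    simp only [List.foldl_cons, List.filter_cons]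
    rw [ih, pvInnerMapper_getD]
    by_cases hc : k = c
    · subst hc; simp [List.append_assoc]
    · have hck : ¬ c = k := fun h => hc h.symm
      simp [hc, hck]

theorem pvMem_mapper (keys : List String) (part o : String) :
    o ∈ (pvBuildPrefixMapper keys).getD part []
      ↔ part ∈ keys ∧ o ∈ keys ∧ PySem.Str.startswith part o = true := by
  unfold pvBuildPrefixMapper
  rw [pvMapper_getD]
  simp only [PySem.Dict.getD_empty, List.nil_append, List.mem_flatMap, List.mem_filter]
  constructor
  · rintro ⟨k, ⟨hk, hkc⟩, ho, hsw⟩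
    exact ⟨by simpa [of_decide_eq_true hkc] using hk, ho, hsw⟩
  · rintro ⟨hp, ho, hsw⟩
    exact ⟨part, ⟨hp, by simp⟩, ho, hsw⟩

theorem pvSw_self (s : String) : PySem.Str.startswith s s = true := by
  simp [PySem.Chars.startswith_iff]

theorem pvSw_iff (s p : String) : PySem.Str.startswith s p = true ↔ p.toList <+: s.toList := by
  rw [PySem.Str.startswith_eq]; exact PySem.Chars.startswith_iff s.toList p.toList

-- membership in B's prefix list
theorem pvMem_prefs (keys1 keys2 : List String) (part o : String) :
    (o ∈ (List.range (part.toList.length + 1)).filterMap (fun l =>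
        let p := String.ofList (part.toList.take l)
        if PySem.Set.contains (PySem.Set.union (PySem.Set.ofList keys1) keys2) p then some p else none))
      ↔ (o ∈ keys1 ++ keys2 ∧ PySem.Str.startswith part o = true) := by
  rw [List.mem_filterMap]
  constructor
  · rintro ⟨l, hl, hf⟩
    dsimp only at hf
    split at hf
    · next hc =>
      obtain rfl : String.ofList (part.toList.take l) = o := by injection hf
      refine ⟨?_, ?_⟩
      · have hm := (PySem.Set.contains_iff _ _).mp hc
        rw [PySem.Set.mem_union, PySem.Set.mem_ofList] at hm
        simpa [List.mem_append] using hm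
      · rw [pvSw_iff]
        simpa using List.take_prefix l part.toList
    · exact absurd hf (by simp)
  · rintro ⟨hmem, hsw⟩
    have hpref : o.toList <+: part.toList := (pvSw_iff part o).mp hsw
    have htake : part.toList.take o.toList.length = o.toList :=
      (List.prefix_iff_eq_take.mp hpref).symm
    refine ⟨o.toList.length, ?_, ?_⟩
    · have := hpref.length_le
      simp only [List.mem_range]
      omega
    · dsimp only
      rw [htake]
      have hc : PySem.Set.contains (PySem.Set.union (PySem.Set.ofList keys1) keys2) o = true := by
        refine (PySem.Set.contains_iff _ _).mpr ?_
        rw [PySem.Set.mem_union, PySem.Set.mem_ofList]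
        simpa [List.mem_append] using hmem
      have ho : String.ofList o.toList = o := by simp
      rw [ho, if_pos hc]

-- max over two nonempty Int lists with the same members
theorem pvMax_eq (xs ys : List Int) (hx : xs ≠ []) (hy : ys ≠ [])
    (h : ∀ x, x ∈ xs ↔ x ∈ ys) :
    (PySem.List.max? xs (fun x => x)).getD 0 = (PySem.List.max? ys (fun x => x)).getD 0 := by
  cases hmx : PySem.List.max? xs (fun x => x) with
  | none => exact absurd ((PySem.List.max?_eq_none_iff xs (fun x => x)).mp hmx) hx
  | some mx =>
  cases hmy : PySem.List.max? ys (fun x => x) with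
  | none => exact absurd ((PySem.List.max?_eq_none_iff ys (fun x => x)).mp hmy) hy
  | some my =>
  have h1 : mx ≤ my := PySem.List.max?_isMax hmy mx ((h mx).mp (PySem.List.max?_mem hmx))
  have h2 : my ≤ mx := PySem.List.max?_isMax hmx my ((h my).mpr (PySem.List.max?_mem hmy))
  simp [le_antisymm h1 h2]

-- the two receiving counters agree for every partition of fsic1
theorem pvRecv_eq (fsic1 fsic2 : List (String × List (String × Int))) (part inst : String)
    (hp : part ∈ fsic1.map (·.1)) :
    (PySem.List.max? (((pvBuildPrefixMapper (fsic1.map (·.1) ++ fsic2.map (·.1))).getD part []).map (pvGet2 fsic2 inst)) (fun x : Int => x)).getD 0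
    = (PySem.List.max? (((List.range (part.toList.length + 1)).filterMap (fun l =>
         let p := String.ofList (part.toList.take l)
         if PySem.Set.contains (PySem.Set.union (PySem.Set.ofList (fsic1.map (·.1))) (fsic2.map (·.1))) p then some p else none)).map (pvGet2 fsic2 inst)) (fun x : Int => x)).getD 0 := by
  have hpk : part ∈ fsic1.map (·.1) ++ fsic2.map (·.1) := List.mem_append_left _ hp
  have hmemiff : ∀ o, o ∈ (pvBuildPrefixMapper (fsic1.map (·.1) ++ fsic2.map (·.1))).getD part []
      ↔ o ∈ (List.range (part.toList.length + 1)).filterMap (fun l =>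
          let p := String.ofList (part.toList.take l)
          if PySem.Set.contains (PySem.Set.union (PySem.Set.ofList (fsic1.map (·.1))) (fsic2.map (·.1))) p then some p else none) := by
    intro o
    rw [pvMem_mapper, pvMem_prefs]
    constructor
    · rintro ⟨_, ho, hsw⟩; exact ⟨ho, hsw⟩
    · rintro ⟨ho, hsw⟩; exact ⟨hpk, ho, hsw⟩
  apply pvMax_eq
  · apply List.ne_nil_of_mem (a := pvGet2 fsic2 inst part)
    exact List.mem_map_of_mem ((pvMem_mapper _ _ _).mpr ⟨hpk, hpk, pvSw_self part⟩)
  · apply List.ne_nil_of_mem (a := pvGet2 fsic2 inst part)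
    exact List.mem_map_of_mem ((pvMem_prefs _ _ _ _).mpr ⟨hpk, pvSw_self part⟩)
  · intro x
    simp only [List.mem_map]
    constructor
    · rintro ⟨p, hpm, rfl⟩; exact ⟨p, (hmemiff p).mp hpm, rfl⟩
    · rintro ⟨p, hpm, rfl⟩; exact ⟨p, (hmemiff p).mpr hpm, rfl⟩

-- A's inner loop over insts, commuted to a single final insert
theorem pvInnerA (v : String → Int) (part : String) (insts : List (String × Int))
    (r : PySem.Dict String (PySem.Dict String Int)) :
    insts.foldl (fun r iv => if v iv.1 < iv.2 then r.insert part ((r.getD part PySem.Dict.empty).insert iv.1 (v iv.1)) else r) r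
      = if insts.all (fun iv => !decide (v iv.1 < iv.2)) then r
        else r.insert part (insts.foldl (fun d iv => if v iv.1 < iv.2 then d.insert iv.1 (v iv.1) else d) (r.getD part PySem.Dict.empty)) := by
  induction insts generalizing r with
  | nil => simp
  | cons iv tl ih =>
    simp only [List.foldl_cons, List.all_cons]
    by_cases hc : v iv.1 < iv.2
    · rw [if_pos hc, if_pos hc, ih]
      have houter : ((!decide (v iv.1 < iv.2)) && tl.all fun iv => !decide (v iv.1 < iv.2)) = false := by
        rw [decide_eq_true hc, Bool.not_true, Bool.false_and]
      rw [houter, if_neg (show ¬(false = true) by simp)]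
      have hd : (r.insert part ((r.getD part PySem.Dict.empty).insert iv.1 (v iv.1))).getD part PySem.Dict.empty
          = (r.getD part PySem.Dict.empty).insert iv.1 (v iv.1) := by
        rw [PySem.Dict.getD_insert_self]
      by_cases hall : tl.all (fun iv => !decide (v iv.1 < iv.2))
      · rw [if_pos hall]
        have hnil : tl.filter (fun iv : String × Int => decide (v iv.1 < iv.2)) = [] := by
          rw [List.filter_eq_nil_iff]
          intro a ha
          simpa using (List.all_eq_true.mp hall) a ha
        rw [PySem.List.foldl_ite_eq_foldl_filter (p := fun iv : String × Int => v iv.1 < iv.2), hnil,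
          List.foldl_nil]
      · rw [if_neg hall, hd, PySem.Dict.insert_insert_self]
    · rw [if_neg hc, if_neg hc, ih, decide_eq_false hc, Bool.not_false, Bool.true_and]

-- the inner dict built by A has as items exactly B's diff list (fresh distinct inst keys)
theorem pvInnerItems (v : String → Int) (insts : List (String × Int))
    (hnd : (insts.map (·.1)).Nodup) :
    (insts.foldl (fun d iv => if v iv.1 < iv.2 then d.insert iv.1 (v iv.1) else d) (PySem.Dict.empty : PySem.Dict String Int)).items
      = insts.foldl (fun diff iv => if v iv.1 < iv.2 then diff ++ [(iv.1, v iv.1)] else diff) [] := by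
  rw [PySem.List.foldl_ite_eq_foldl_filter (p := fun iv : String × Int => v iv.1 < iv.2)]
  rw [PySem.List.foldl_append_ite (p := fun iv : String × Int => v iv.1 < iv.2)
      (f := fun iv : String × Int => (iv.1, v iv.1))]
  rw [PySem.Dict.items_foldl_insert_fresh (k := fun iv : String × Int => iv.1)
      (v := fun iv : String × Int => v iv.1)]
  · simp [PySem.Dict.empty]
  · intro a _; exact PySem.Dict.contains_empty _
  · exact hnd.sublist (List.filter_sublist.map _)

-- outer loop: A's dict-of-dicts, flattened to items, equals B's filtered per-partition diffs
theorem pvOuter (vA vB : String → String → Int) (l : List (String × List (String × Int)))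
    (r : PySem.Dict String (PySem.Dict String Int))
    (hv : ∀ pi ∈ l, ∀ inst, vA pi.1 inst = vB pi.1 inst)
    (hfresh : ∀ pi ∈ l, r.contains pi.1 = false)
    (hnd : (l.map (·.1)).Nodup)
    (hknd : r.keys.Nodup)
    (hinner : ∀ pi ∈ l, (pi.2.map (·.1)).Nodup) :
    (l.foldl (fun result pi =>
        pi.2.foldl (fun result iv =>
          if vA pi.1 iv.1 < iv.2 then
            result.insert pi.1 ((result.getD pi.1 PySem.Dict.empty).insert iv.1 (vA pi.1 iv.1))
          else result) result) r).items.map (fun pd => (pd.1, pd.2.items))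
      = r.items.map (fun pd => (pd.1, pd.2.items)) ++
        (l.filter (fun pi => decide ((pi.2.foldl (fun diff iv =>
            if vB pi.1 iv.1 < iv.2 then diff ++ [(iv.1, vB pi.1 iv.1)] else diff) []) ≠ []))).map
          (fun pi => (pi.1, pi.2.foldl (fun diff iv =>
            if vB pi.1 iv.1 < iv.2 then diff ++ [(iv.1, vB pi.1 iv.1)] else diff) [])) := by
  induction l generalizing r with
  | nil => simp
  | cons pi tl ih =>
    have hnd' : pi.1 ∉ tl.map (·.1) ∧ (tl.map (·.1)).Nodup := by
      simpa using hnd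
    have hfun : vA pi.1 = vB pi.1 := funext (hv pi (List.mem_cons_self ..))
    have hcontains : r.contains pi.1 = false := hfresh pi (List.mem_cons_self ..)
    have hE : pi.2.foldl (fun diff iv =>
          if vB pi.1 iv.1 < iv.2 then diff ++ [(iv.1, vB pi.1 iv.1)] else diff) []
        = (pi.2.filter (fun iv => decide (vB pi.1 iv.1 < iv.2))).map (fun iv => (iv.1, vB pi.1 iv.1)) := by
      rw [PySem.List.foldl_append_ite (p := fun iv : String × Int => vB pi.1 iv.1 < iv.2)
          (f := fun iv : String × Int => (iv.1, vB pi.1 iv.1))]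
      simp
    simp only [List.foldl_cons, List.filter_cons]
    rw [pvInnerA (v := vA pi.1) (part := pi.1),
        PySem.Dict.getD_of_not_contains _ _ hcontains]
    by_cases hall : pi.2.all (fun iv => !decide (vA pi.1 iv.1 < iv.2))
    · -- no instance qualifies: A leaves r unchanged, B's diff is empty
      have hEnil : pi.2.foldl (fun diff iv =>
            if vB pi.1 iv.1 < iv.2 then diff ++ [(iv.1, vB pi.1 iv.1)] else diff) [] = ([] : List (String × Int)) := by
        rw [hE, List.map_eq_nil_iff, List.filter_eq_nil_iff]
        intro a ha
        have := (List.all_eq_true.mp hall) a ha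
        rw [hfun] at this
        simpa using this
      rw [if_pos hall, hEnil]
      rw [if_neg (show ¬(decide (([] : List (String × Int)) ≠ []) = true) by simp)]
      exact ih r (fun q hq => hv q (List.mem_cons_of_mem _ hq))
        (fun q hq => hfresh q (List.mem_cons_of_mem _ hq)) hnd'.2 hknd
        (fun q hq => hinner q (List.mem_cons_of_mem _ hq))
    · -- some instance qualifies: A inserts a fresh key, B appends the diff
      rw [if_neg hall]
      have hEne : pi.2.foldl (fun diff iv =>
            if vB pi.1 iv.1 < iv.2 then diff ++ [(iv.1, vB pi.1 iv.1)] else diff) [] ≠ ([] : List (String × Int)) := by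
        rw [hE]
        intro hnil
        apply hall
        rw [List.all_eq_true]
        intro a ha
        rw [List.map_eq_nil_iff, List.filter_eq_nil_iff] at hnil
        have := hnil a ha
        rw [hfun]
        simpa using this
      rw [if_pos (show decide ((pi.2.foldl (fun diff iv =>
            if vB pi.1 iv.1 < iv.2 then diff ++ [(iv.1, vB pi.1 iv.1)] else diff) []) ≠ ([] : List (String × Int))) = true from decide_eq_true hEne)]
      set X := pi.2.foldl (fun d iv => if vA pi.1 iv.1 < iv.2 then d.insert iv.1 (vA pi.1 iv.1) else d) PySem.Dict.empty with hXdef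
      have hfreshtl : ∀ q ∈ tl, (r.insert pi.1 X).contains q.1 = false := by
        intro q hq
        rw [PySem.Dict.contains_insert]
        have hne : q.1 ≠ pi.1 := by
          intro h
          exact hnd'.1 (h ▸ List.mem_map_of_mem hq)
        simp [hne, hfresh q (List.mem_cons_of_mem _ hq)]
      have hkndtl : (r.insert pi.1 X).keys.Nodup := by
        rw [PySem.Dict.keys_insert_of_not_contains _ _ hcontains]
        rw [List.nodup_append]
        have hpk : pi.1 ∉ r.keys := fun hmem =>
          absurd ((PySem.Dict.contains_iff_mem_keys _ _).mpr hmem) (by simp [hcontains])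
        exact ⟨hknd, List.nodup_singleton _, by simpa [List.disjoint_singleton] using fun a ha (h : a = pi.1) => hpk (h ▸ ha)⟩
      rw [ih (r.insert pi.1 X) (fun q hq => hv q (List.mem_cons_of_mem _ hq)) hfreshtl hnd'.2 hkndtl
        (fun q hq => hinner q (List.mem_cons_of_mem _ hq))]
      rw [PySem.Dict.items_insert_of_not_contains _ _ hcontains, List.map_append]
      have hX : X.items = pi.2.foldl (fun diff iv =>
          if vB pi.1 iv.1 < iv.2 then diff ++ [(iv.1, vB pi.1 iv.1)] else diff) [] := by
        rw [hXdef, pvInnerItems (v := vA pi.1) pi.2 (hinner pi (List.mem_cons_self ..)), hfun]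
      simp [hX, List.append_assoc]

-- ===== VERDICT (by name: the statement is the Claim_ definition above) =====
theorem calculate_directional_fsic_diff_v2_spec : Claim_equal_calculate_directional_fsic_diff_v2 := by
  intro fsic1 fsic2 _hdom hpre
  obtain ⟨hnd1, hnd2, hin1, _hin2⟩ := hpre
  unfold Spec_calculate_directional_fsic_diff_v2
  unfold calculate_directional_fsic_diff_v2 calculate_directional_fsic_diff_v2_alt
  dsimp only
  rw [PySem.List.foldl_append_ite
      (p := fun pi : String × List (String × Int) => (pi.2.foldl (fun diff iv =>
        if (PySem.List.max? (((List.range (pi.1.toList.length + 1)).filterMap (β := String) (fun l =>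
              let p := String.ofList (pi.1.toList.take l)
              if PySem.Set.contains (PySem.Set.union (PySem.Set.ofList (fsic1.map (·.1))) (fsic2.map (·.1))) p then some p else none)).map (pvGet2 fsic2 iv.1)) (fun x : Int => x)).getD 0 < iv.2
        then diff ++ [(iv.1, (PySem.List.max? (((List.range (pi.1.toList.length + 1)).filterMap (β := String) (fun l =>
              let p := String.ofList (pi.1.toList.take l)
              if PySem.Set.contains (PySem.Set.union (PySem.Set.ofList (fsic1.map (·.1))) (fsic2.map (·.1))) p then some p else none)).map (pvGet2 fsic2 iv.1)) (fun x : Int => x)).getD 0)]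
        else diff) []) ≠ [])
      (f := fun pi : String × List (String × Int) => (pi.1, pi.2.foldl (fun diff iv =>
        if (PySem.List.max? (((List.range (pi.1.toList.length + 1)).filterMap (β := String) (fun l =>
              let p := String.ofList (pi.1.toList.take l)
              if PySem.Set.contains (PySem.Set.union (PySem.Set.ofList (fsic1.map (·.1))) (fsic2.map (·.1))) p then some p else none)).map (pvGet2 fsic2 iv.1)) (fun x : Int => x)).getD 0 < iv.2
        then diff ++ [(iv.1, (PySem.List.max? (((List.range (pi.1.toList.length + 1)).filterMap (β := String) (fun l =>
              let p := String.ofList (pi.1.toList.take l)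
              if PySem.Set.contains (PySem.Set.union (PySem.Set.ofList (fsic1.map (·.1))) (fsic2.map (·.1))) p then some p else none)).map (pvGet2 fsic2 iv.1)) (fun x : Int => x)).getD 0)]
        else diff) []))]
  have h := pvOuter
    (vA := fun part inst => (PySem.List.max? (((pvBuildPrefixMapper (fsic1.map (·.1) ++ fsic2.map (·.1))).getD part []).map (pvGet2 fsic2 inst)) (fun x : Int => x)).getD 0)
    (vB := fun part inst => (PySem.List.max? (((List.range (part.toList.length + 1)).filterMap (β := String) (fun l =>
        let p := String.ofList (part.toList.take l)
        if PySem.Set.contains (PySem.Set.union (PySem.Set.ofList (fsic1.map (·.1))) (fsic2.map (·.1))) p then some p else none)).map (pvGet2 fsic2 inst)) (fun x : Int => x)).getD 0)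
    fsic1 PySem.Dict.empty
    (fun pi hpi inst => pvRecv_eq fsic1 fsic2 pi.1 inst (List.mem_map_of_mem hpi))
    (fun pi _ => PySem.Dict.contains_empty _)
    hnd1
    (by simp [PySem.Dict.keys_empty])
    hin1
  simpa using h
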